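-- pv_equiv track=rewrite | github.com/benjaminsenk/k-metric-dimension | produkt_poti.py | minimal_set_of_columns
-- ===== SOURCE A (Python) =====
-- def minimal_set_of_columns(matrix, k):
--     num_rows = len(matrix)
--     num_cols = len(matrix[0])
--
--     dp = [0] * (1 << num_cols)
--     col_indices = [-1] * (1 << num_cols)
--     min_set = []
--
--     for mask in range(1 << num_cols):
--         total_sum = [0] * num_rows
--
--         for j in range(num_cols):
--             if mask & (1 << j):
--                 for i in range(num_rows):
--                     total_sum[i] += matrix[i][j]
--
--         valid = True
--         for i in range(num_rows):
--             if total_sum[i] < k: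
--                 valid = False
--                 break
--
--         if valid:
--             dp[mask] = bin(mask).count('1')
--
--             col_indices[mask] = [j for j in range(num_cols) if mask & (1 << j)]
--
--             if len(min_set) == 0 or dp[mask] < dp[min_set[0]]:
--                 min_set = [mask]
--             elif dp[mask] == dp[min_set[0]]:
--                 min_set.append(mask)
--
--     return [set(col_indices[mask]) for mask in min_set]
-- ===== SOURCE B (Python) =====
-- def minimal_set_of_columns(matrix, k):
--     R = len(matrix)
--     C = len(matrix[0])
--     # incremental subset sums: one column added per doubling of the state list
--     states = [(0, [0] * R)]
--     for j in range(C):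
--         states = states + [
--             (m | (1 << j), [s[i] + matrix[i][j] for i in range(R)])
--             for (m, s) in states
--         ]
--     valids = [(m, s) for (m, s) in states if all(v >= k for v in s)]
--     if not valids:
--         return []
--     p = min(bin(m).count("1") for m, _ in valids)
--     return [
--         {j for j in range(C) if (m >> j) & 1}
--         for m, _ in valids
--         if bin(m).count("1") == p
--     ]
-- ===== Notes on version B (the rewrite author's own statement) =====
-- stated objective: faster
-- what changed: Instead of recomputing every mask's row-sum vector from scratch with a triple nested loop and tracking the running argmin online in dp/col_indices arrays, B builds all 2^C (mask, row-sum) pairs incrementally by doubling a state list once per column, then post-filters the valid masks by the minimum popcount.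
import Mathlib
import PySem

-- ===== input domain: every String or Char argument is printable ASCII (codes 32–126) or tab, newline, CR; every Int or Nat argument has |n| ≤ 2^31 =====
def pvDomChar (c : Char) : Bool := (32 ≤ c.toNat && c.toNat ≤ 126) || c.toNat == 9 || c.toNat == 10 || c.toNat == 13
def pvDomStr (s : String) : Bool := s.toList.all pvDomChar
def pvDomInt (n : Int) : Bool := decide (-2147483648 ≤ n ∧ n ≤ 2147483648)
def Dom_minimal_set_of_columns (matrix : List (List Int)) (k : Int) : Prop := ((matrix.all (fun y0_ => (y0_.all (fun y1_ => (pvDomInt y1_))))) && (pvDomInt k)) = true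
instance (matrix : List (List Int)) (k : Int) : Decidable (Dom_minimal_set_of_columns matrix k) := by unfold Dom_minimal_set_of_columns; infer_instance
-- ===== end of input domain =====

-- B replaces A's per-mask from-scratch row-sum recomputation and online argmin bookkeeping by
-- an incremental doubling of a (mask, row-sums) list (one column per round) plus a popcount
-- post-filter; objective: faster (measured).

-- bin(mask).count('1') — popcount by repeated division, used by both ports
def binCountOnes : Nat → Nat
  | 0 => 0
  | n + 1 => (n + 1) % 2 + binCountOnes ((n + 1) / 2)
decreasing_by omega

-- ===== PORT A =====
-- the body of A's 'for mask in range(1 << num_cols)' loop, named so the loop invariant can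
-- refer to it; col_indices holds -1 sentinels that Python only ever overwrites before reading
-- (entries are read only for masks in min_set, which are valid), ported as Option
def pvAStep (matrix : List (List Int)) (k : Int)
    (st : List Int × List (Option (List Int)) × List Nat) (mask : Nat) :
    List Int × List (Option (List Int)) × List Nat :=
  let numRows := matrix.length
  let numCols := (matrix.headD []).length
  let dp := st.1
  let colInd := st.2.1
  let minSet := st.2.2
  let totalSum := (List.range numCols).foldl (fun ts j =>
    if mask &&& (1 <<< j) ≠ 0 then
      (List.range numRows).foldl (fun ts i =>
        ts.set i (ts.getD i 0 + (matrix.getD i []).getD j 0)) ts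
    else ts) (List.replicate numRows (0 : Int))
  let valid := totalSum.all (fun v => decide (¬ v < k))   -- the for-loop with break ≡ all
  if valid then
    let dp := dp.set mask (Int.ofNat (binCountOnes mask))
    let colInd := colInd.set mask
      (some (((List.range numCols).filter (fun j => mask &&& (1 <<< j) ≠ 0)).map Int.ofNat))
    let minSet :=
      if minSet = [] then [mask]
      else if dp.getD mask 0 < dp.getD (minSet.headD 0) 0 then [mask]
      else if dp.getD mask 0 = dp.getD (minSet.headD 0) 0 then minSet ++ [mask]
      else minSet
    (dp, colInd, minSet)
  else st

def minimal_set_of_columns (matrix : List (List Int)) (k : Int) : List (List Int) :=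
  let numCols := (matrix.headD []).length
  let init : List Int × List (Option (List Int)) × List Nat :=
    (List.replicate (2 ^ numCols) 0, List.replicate (2 ^ numCols) none, [])
  let final := (List.range (2 ^ numCols)).foldl (pvAStep matrix k) init
  final.2.2.map (fun mask => PySem.Set.ofList ((final.2.1.getD mask none).getD []))

-- ===== PORT B =====
def minimal_set_of_columns_alt (matrix : List (List Int)) (k : Int) : List (List Int) :=
  let R := matrix.length
  let C := (matrix.headD []).length
  let states := (List.range C).foldl (fun sts j =>
      sts ++ sts.map (fun ms =>
        (ms.1 ||| (1 <<< j),
         (List.range R).map (fun i => ms.2.getD i 0 + (matrix.getD i []).getD j 0))))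
    [((0 : Nat), List.replicate R (0 : Int))]
  let valids := states.filter (fun ms => ms.2.all (fun v => decide (k ≤ v)))
  match (valids.map (fun ms => binCountOnes ms.1)).min? with
  | none => []
  | some p =>
      (valids.filter (fun ms => binCountOnes ms.1 = p)).map (fun ms =>
        PySem.Set.ofList (((List.range C).filter (fun j => (ms.1 >>> j) &&& 1 = 1)).map Int.ofNat))

-- ===== PRECONDITION & SPEC =====
-- Pre_ excludes exactly the inputs where Python A raises: an empty matrix (IndexError on
-- matrix[0]) and matrices with a row shorter than row 0 (IndexError on matrix[i][j]).
def Pre_minimal_set_of_columns (matrix : List (List Int)) (k : Int) : Prop :=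
  matrix ≠ [] ∧ ∀ row ∈ matrix, (matrix.headD []).length ≤ row.length
instance (matrix : List (List Int)) (k : Int) : Decidable (Pre_minimal_set_of_columns matrix k) := by
  unfold Pre_minimal_set_of_columns; infer_instance
def pvWitness_minimal_set_of_columns : List (List Int) × Int := ([[1, 0], [0, 1]], 1)

def Spec_minimal_set_of_columns (matrix : List (List Int)) (k : Int) (out : List (List Int)) : Prop := out = minimal_set_of_columns_alt matrix k
instance (matrix : List (List Int)) (k : Int) (out : List (List Int)) : Decidable (Spec_minimal_set_of_columns matrix k out) := by unfold Spec_minimal_set_of_columns; infer_instance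

-- ===== CLAIM (what is proved, stated in full; the proofs are below) =====
def Claim_equal_minimal_set_of_columns : Prop := ∀ (matrix : List (List Int)) (k : Int), Dom_minimal_set_of_columns matrix k → Pre_minimal_set_of_columns matrix k → Spec_minimal_set_of_columns matrix k (minimal_set_of_columns matrix k)

-- ===== LEMMAS AND PROOFS =====

-- the row-sum vector of a mask: the common mathematical description of both ports' sums
def pvSV (matrix : List (List Int)) (R C m : Nat) : List Int :=
  (List.range R).map (fun i =>
    ∑ j ∈ Finset.range C, if m.testBit j then (matrix.getD i []).getD j 0 else 0)

theorem pv_and_shift (m j : Nat) : (m &&& (1 <<< j) ≠ 0) ↔ Nat.testBit m j := by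
  simp [Nat.shiftLeft_eq, Nat.and_two_pow]

theorem pv_lor_two_pow (j x : Nat) (h : x < 2 ^ j) : x ||| 1 <<< j = 2 ^ j + x := by
  have := Nat.two_pow_add_eq_or_of_lt h 1
  rw [Nat.shiftLeft_eq, one_mul]
  simpa [Nat.lor_comm] using this.symm

theorem pv_testBit_add_pow (j x t : Nat) (h : x < 2 ^ j) :
    Nat.testBit (2 ^ j + x) t = (Nat.testBit x t || decide (j = t)) := by
  rw [← pv_lor_two_pow j x h, Nat.shiftLeft_eq, one_mul]
  simp [Nat.testBit_two_pow]

theorem pv_valid_congr (ts : List Int) (k : Int) :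
    (ts.all (fun v => decide (¬ v < k))) = (ts.all (fun v => decide (k ≤ v))) := by
  simp [not_lt]

-- the inner row loop of A: a fold of list.set over all indices is a pointwise map
theorem pv_set_loop (f : Nat → Int) (ts : List Int) (t : Nat) (ht : t ≤ ts.length) :
    (List.range t).foldl (fun ts i => ts.set i (ts.getD i 0 + f i)) ts
      = ts.mapIdx (fun i a => if i < t then a + f i else a) := by
  induction t with
  | zero => apply List.ext_getElem <;> simp
  | succ t ih =>
      rw [List.range_succ, List.foldl_append, ih (by omega)]
      simp only [List.foldl_cons, List.foldl_nil]
      apply List.ext_getElem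
      · simp
      · intro i h1 h2
        rw [List.getElem_set]
        simp only [List.getElem_mapIdx]
        rcases Nat.lt_trichotomy i t with hc | hc | hc
        · simp [Nat.ne_of_gt hc, hc, Nat.lt_succ_of_lt hc]
        · subst hc
          have hl : i < ts.length := by omega
          rw [if_pos rfl, List.getD_eq_getElem?_getD]
          simp [List.getElem?_mapIdx, List.getElem?_eq_getElem hl]
        · rw [if_neg (by omega)]; rw [if_neg (by omega), if_neg (by omega)]

-- A's total_sum triple loop computes pvSV
theorem pv_A_totalSum (matrix : List (List Int)) (R C m : Nat) :
    (List.range C).foldl (fun ts j =>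
        if m &&& (1 <<< j) ≠ 0 then
          (List.range R).foldl (fun ts i =>
            ts.set i (ts.getD i 0 + (matrix.getD i []).getD j 0)) ts
        else ts) (List.replicate R (0 : Int))
      = pvSV matrix R C m := by
  induction C with
  | zero => simp [pvSV, List.map_const']
  | succ C ih =>
      rw [List.range_succ, List.foldl_append, ih]
      simp only [List.foldl_cons, List.foldl_nil]
      by_cases hb : m &&& (1 <<< C) ≠ 0
      · rw [if_pos hb,
          pv_set_loop (fun i => (matrix.getD i []).getD C 0) (pvSV matrix R C m) R (by simp [pvSV])]
        apply List.ext_getElem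
        · simp [pvSV]
        · intro i h1 h2
          have hi : i < R := by simpa [pvSV] using h2
          simp only [List.getElem_mapIdx, pvSV, List.getElem_map, List.getElem_range]
          rw [Finset.sum_range_succ, if_pos ((pv_and_shift m C).mp hb), if_pos hi]
      · rw [if_neg hb]
        have hbit : ¬ Nat.testBit m C := fun h => hb ((pv_and_shift m C).mpr h)
        simp only [pvSV]
        apply List.map_congr_left
        intro i _
        rw [Finset.sum_range_succ, if_neg hbit, add_zero]

-- B's doubling loop enumerates all masks of range (2^C) with their pvSV vectors, in order
theorem pv_B_states (matrix : List (List Int)) (R C : Nat) :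
    (List.range C).foldl (fun sts j =>
        sts ++ sts.map (fun ms =>
          (ms.1 ||| (1 <<< j),
           (List.range R).map (fun i => ms.2.getD i 0 + (matrix.getD i []).getD j 0))))
      [((0 : Nat), List.replicate R (0 : Int))]
      = (List.range (2 ^ C)).map (fun m => (m, pvSV matrix R C m)) := by
  induction C with
  | zero => simp [pvSV, List.map_const']
  | succ C ih =>
      rw [List.range_succ, List.foldl_append, ih]
      simp only [List.foldl_cons, List.foldl_nil]
      have h2 : 2 ^ (C + 1) = 2 ^ C + 2 ^ C := by ring
      rw [h2, List.range_add, List.map_append, List.map_map]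
      congr 1
      · apply List.map_congr_left
        intro m hm
        have hm' : m < 2 ^ C := List.mem_range.mp hm
        simp only [pvSV]
        refine congrArg (Prod.mk m) (List.map_congr_left fun i _ => ?_)
        rw [Finset.sum_range_succ, if_neg (by simp [Nat.testBit_lt_two_pow hm']), add_zero]
      · rw [List.map_map]
        apply List.map_congr_left
        intro m hm
        have hm' : m < 2 ^ C := List.mem_range.mp hm
        have hor := pv_lor_two_pow C m hm'
        simp only [Function.comp_apply]
        refine Prod.ext hor ?_
        simp only [pvSV]
        apply List.map_congr_left
        intro i hi
        have hiR : i < R := List.mem_range.mp hi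
        have hget : (((List.range R).map (fun i =>
            ∑ j ∈ Finset.range C, if m.testBit j then (matrix.getD i []).getD j 0 else 0)).getD i 0)
            = ∑ j ∈ Finset.range C, if m.testBit j then (matrix.getD i []).getD j 0 else 0 := by
          rw [List.getD_eq_getElem?_getD]
          simp [hiR]
        rw [hget, Finset.sum_range_succ,
          if_pos (by simp [pv_testBit_add_pow C m C hm'])]
        have hcon : ∀ j ∈ Finset.range C,
            (if (2 ^ C + m).testBit j then (matrix.getD i []).getD j 0 else 0)
              = (if m.testBit j then (matrix.getD i []).getD j 0 else 0) := by
          intro j hj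
          have hj' : j < C := Finset.mem_range.mp hj
          rw [pv_testBit_add_pow C m j hm']
          simp [Nat.ne_of_lt' hj']
        rw [Finset.sum_congr rfl hcon]


-- A's online argmin-collecting fold, abstracted
def pvAm (f : Nat → Nat) (l : List Nat) : List Nat :=
  l.foldl (fun acc m =>
    if acc = [] then [m]
    else if f m < f (acc.headD 0) then [m]
    else if f m = f (acc.headD 0) then acc ++ [m]
    else acc) []

theorem pv_min?_concat (xs : List Nat) (y : Nat) :
    (xs ++ [y]).min? = some (match xs.min? with | none => y | some p => min p y) := by
  induction xs with
  | nil => simp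
  | cons a xs ih =>
      cases h : xs.min? with
      | none =>
          have : xs = [] := by cases xs <;> simp_all [List.min?]
          subst this
          simp [List.min?]
      | some p =>
          simp only [List.cons_append, List.min?_cons, ih, h]
          cases xs with
          | nil => simp_all
          | cons b xs' => simp_all [List.min?_cons]

theorem pv_headD_mem (l : List Nat) (h : l ≠ []) : l.headD 0 ∈ l := by
  obtain ⟨a, rest, he⟩ := List.exists_cons_of_ne_nil h
  subst he
  simp

-- the online argmin fold returns exactly the minimal-f elements, in order
theorem pv_am_eq (f : Nat → Nat) (l : List Nat) :
    pvAm f l = match (l.map f).min? with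
      | none => []
      | some p => l.filter (fun m => f m = p) := by
  induction l using List.reverseRecOn with
  | nil => simp [pvAm]
  | append_singleton l y ih =>
      rw [pvAm, List.foldl_append, ← pvAm, ih]
      cases h : (l.map f).min? with
      | none =>
          have : l = [] := by cases l <;> simp_all
          subst this
          simp [List.min?]
      | some p =>
          obtain ⟨hmem, hle'⟩ := List.min?_eq_some_iff.mp h
          have hle : ∀ q ∈ l, p ≤ f q := fun q hq => hle' _ (List.mem_map_of_mem hq)
          have hne : l.filter (fun m => f m = p) ≠ [] := by
            obtain ⟨m, hm, hfm⟩ := List.mem_map.mp hmem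
            intro hcon
            exact (List.filter_eq_nil_iff.mp hcon) m hm (by simp [hfm])
          have hhead : f ((l.filter (fun m => f m = p)).headD 0) = p := by
            simpa using List.of_mem_filter (pv_headD_mem _ hne)
          simp only [List.map_append, List.map_cons, List.map_nil]
          rw [pv_min?_concat, h]
          simp only [List.foldl_cons, List.foldl_nil]
          rw [if_neg hne, hhead]
          rcases Nat.lt_trichotomy (f y) p with hc | hc | hc
          · rw [if_pos hc, List.filter_append]
            have hm : min p (f y) = f y := by omega
            simp only [hm]
            have hnil : l.filter (fun m => f m = f y) = [] := by
              apply List.filter_eq_nil_iff.mpr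
              intro m hm'
              have := hle m hm'
              simp
              omega
            simp [hnil]
          · rw [if_neg (by omega), if_pos hc, List.filter_append]
            have hm : min p (f y) = p := by omega
            simp [hm, hc]
          · rw [if_neg (by omega), if_neg (by omega), List.filter_append]
            have hm : min p (f y) = p := by omega
            simp only [hm]
            have hy : ¬ (f y = p) := by omega
            simp [hy]

-- the valid-mask test both ports reduce to
def pvValid (matrix : List (List Int)) (k : Int) (R C m : Nat) : Bool :=
  (pvSV matrix R C m).all (fun v => decide (k ≤ v))

-- column-index list of a mask, as Ints
def pvCols (C m : Nat) : List Int :=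
  ((List.range C).filter (fun j => m &&& (1 <<< j) ≠ 0)).map Int.ofNat

theorem pv_am_subset (f : Nat → Nat) (l : List Nat) : ∀ x ∈ pvAm f l, x ∈ l := by
  rw [pv_am_eq]
  cases h : (l.map f).min? with
  | none => simp
  | some p => exact fun x hx => List.mem_of_mem_filter hx

-- invariant of A's main fold after t iterations
theorem pv_A_fold (matrix : List (List Int)) (k : Int) (t : Nat)
    (ht : t ≤ 2 ^ (matrix.headD []).length) :
    (List.range t).foldl (pvAStep matrix k)
      (List.replicate (2 ^ (matrix.headD []).length) (0 : Int),
       List.replicate (2 ^ (matrix.headD []).length) (none : Option (List Int)), ([] : List Nat))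
    = ((List.range (2 ^ (matrix.headD []).length)).map (fun m =>
         if m < t ∧ pvValid matrix k matrix.length (matrix.headD []).length m
         then Int.ofNat (binCountOnes m) else 0),
       (List.range (2 ^ (matrix.headD []).length)).map (fun m =>
         if m < t ∧ pvValid matrix k matrix.length (matrix.headD []).length m
         then some (pvCols (matrix.headD []).length m) else none),
       pvAm binCountOnes ((List.range t).filter
         (fun m => pvValid matrix k matrix.length (matrix.headD []).length m))) := by
  induction t with
  | zero =>
      refine Prod.ext ?_ (Prod.ext ?_ ?_)
      · apply List.ext_getElem <;> simp
      · apply List.ext_getElem <;> simp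
      · simp [pvAm]
  | succ t ih =>
      have htC : t < 2 ^ (matrix.headD []).length := by omega
      rw [List.range_succ, List.foldl_append, ih (by omega)]
      simp only [List.foldl_cons, List.foldl_nil]
      rw [pvAStep]
      simp only [pv_A_totalSum, pv_valid_congr]
      set C := (matrix.headD []).length with hC
      set R := matrix.length with hR
      set f := binCountOnes with hf
      set v := fun m => pvValid matrix k R C m with hv
      by_cases hval : (pvSV matrix R C t).all (fun b => decide (k ≤ b)) = true
      · have hvt : v t = true := hval
        rw [if_pos hval]
        have hdp : ((List.range (2 ^ C)).map (fun m =>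
              if m < t ∧ v m = true then Int.ofNat (f m) else 0)).set t (Int.ofNat (f t))
            = (List.range (2 ^ C)).map (fun m =>
              if m < t + 1 ∧ v m = true then Int.ofNat (f m) else 0) := by
          apply List.ext_getElem
          · simp
          · intro i h1 h2
            rw [List.getElem_set]
            simp only [List.getElem_map, List.getElem_range]
            by_cases hit : t = i
            · subst hit
              rw [if_pos rfl, if_pos ⟨by omega, hvt⟩]
            · have hne : i ≠ t := fun h => hit h.symm
              rw [if_neg hit]
              by_cases hvi : v i = true
              · by_cases hlt : i < t
                · rw [if_pos ⟨hlt, hvi⟩, if_pos ⟨by omega, hvi⟩]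
                · rw [if_neg (by tauto), if_neg (by rintro ⟨hx, _⟩; omega)]
              · rw [if_neg (by tauto), if_neg (by tauto)]
        have hci : ((List.range (2 ^ C)).map (fun m =>
              if m < t ∧ v m = true then some (pvCols C m) else none)).set t
                (some (((List.range C).filter (fun j => t &&& (1 <<< j) ≠ 0)).map Int.ofNat))
            = (List.range (2 ^ C)).map (fun m =>
              if m < t + 1 ∧ v m = true then some (pvCols C m) else none) := by
          apply List.ext_getElem
          · simp
          · intro i h1 h2
            rw [List.getElem_set]
            simp only [List.getElem_map, List.getElem_range]
            by_cases hit : t = i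
            · subst hit
              rw [if_pos rfl, if_pos ⟨by omega, hvt⟩]
              simp [pvCols]
            · have hne : i ≠ t := fun h => hit h.symm
              rw [if_neg hit]
              by_cases hvi : v i = true
              · by_cases hlt : i < t
                · rw [if_pos ⟨hlt, hvi⟩, if_pos ⟨by omega, hvi⟩]
                · rw [if_neg (by tauto), if_neg (by rintro ⟨hx, _⟩; omega)]
              · rw [if_neg (by tauto), if_neg (by tauto)]
        rw [hdp, hci]
        refine congrArg _ (congrArg _ ?_)
        -- the min_set component
        have hft : List.filter v [t] = [t] := by simp [hvt]
        rw [List.filter_append, hft]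
        conv_rhs => rw [pvAm, List.foldl_append]
        conv_rhs => rw [← pvAm]
        simp only [List.foldl_cons, List.foldl_nil]
        set ms := pvAm f ((List.range t).filter v) with hms
        have hdpt : ((List.range (2 ^ C)).map (fun m =>
              if m < t + 1 ∧ v m = true then Int.ofNat (f m) else 0)).getD t 0
            = Int.ofNat (f t) := by
          have hl : t < (((List.range (2 ^ C)).map (fun m =>
              if m < t + 1 ∧ v m = true then Int.ofNat (f m) else 0))).length := by
            simpa using htC
          rw [List.getD_eq_getElem?_getD, List.getElem?_eq_getElem hl]
          simp [hvt]
        by_cases hemp : ms = []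
        · rw [if_pos hemp, if_pos hemp]
        · rw [if_neg hemp, if_neg hemp]
          have hmem0 : ms.headD 0 ∈ (List.range t).filter v := by
            rw [hms]
            exact pv_am_subset f _ _ (pv_headD_mem _ hemp)
          have hlt0 : ms.headD 0 < t := List.mem_range.mp (List.mem_of_mem_filter hmem0)
          have hv0 : v (ms.headD 0) = true := List.of_mem_filter hmem0
          have hdph : ((List.range (2 ^ C)).map (fun m =>
                if m < t + 1 ∧ v m = true then Int.ofNat (f m) else 0)).getD (ms.headD 0) 0
              = Int.ofNat (f (ms.headD 0)) := by
            have hl0 : ms.headD 0 < 2 ^ C := by omega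
            have hl : ms.headD 0 < (((List.range (2 ^ C)).map (fun m =>
                if m < t + 1 ∧ v m = true then Int.ofNat (f m) else 0))).length := by
              simpa using hl0
            rw [List.getD_eq_getElem?_getD, List.getElem?_eq_getElem hl]
            simp only [List.getElem_map, List.getElem_range]
            rw [if_pos ⟨by omega, hv0⟩]
            rfl
          rw [hdpt, hdph]
          simp only [Int.ofNat_eq_natCast, Nat.cast_lt, Nat.cast_inj]
      · have hvf : v t = false := Bool.eq_false_iff.mpr (by simpa [hv, pvValid] using hval)
        rw [if_neg hval]
        have hfl : List.filter v (List.range t ++ [t]) = List.filter v (List.range t) := by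
          rw [List.filter_append]
          simp [hvf]
        rw [hfl]
        have hcong : ∀ (m : Nat), m ∈ List.range (2 ^ C) →
            ((m < t ∧ v m = true) ↔ (m < t + 1 ∧ v m = true)) := by
          intro m hm
          constructor
          · rintro ⟨h1, h2⟩; exact ⟨by omega, h2⟩
          · rintro ⟨h1, h2⟩
            refine ⟨?_, h2⟩
            rcases Nat.lt_or_ge m t with h | h
            · exact h
            · have : m = t := by omega
              rw [this] at h2
              rw [h2] at hvf
              cases hvf
        refine Prod.ext ?_ (Prod.ext ?_ rfl)
        · exact List.map_congr_left fun m hm => if_congr (by rw [hcong m hm]) rfl rfl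
        · exact List.map_congr_left fun m hm => if_congr (by rw [hcong m hm]) rfl rfl

-- ===== VERDICT (by name: the statement is the Claim_ definition above) =====
theorem minimal_set_of_columns_spec : Claim_equal_minimal_set_of_columns := by
  intro matrix k hdom hpre
  unfold Spec_minimal_set_of_columns
  simp only [minimal_set_of_columns, minimal_set_of_columns_alt]
  rw [pv_A_fold matrix k (2 ^ (matrix.headD []).length) (Nat.le_refl _)]
  rw [pv_B_states matrix matrix.length ((matrix.headD []).length)]
  rw [List.filter_map, List.map_map]
  simp only [Function.comp_def]
  simp only [← pvValid.eq_def]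
  rw [pv_am_eq]
  have heta : (fun x => binCountOnes x) = binCountOnes := rfl
  rw [heta]
  cases h : (((List.range (2 ^ (matrix.headD []).length)).filter
      (fun x => pvValid matrix k matrix.length (matrix.headD []).length x)).map
        binCountOnes).min? with
  | none => simp
  | some p =>
      simp only []
      rw [List.filter_map, List.map_map]
      simp only [Function.comp_def]
      apply List.map_congr_left
      intro m hm
      have hm' : m ∈ (List.range (2 ^ (matrix.headD []).length)).filter
          (fun x => pvValid matrix k matrix.length (matrix.headD []).length x) :=
        List.mem_of_mem_filter hm
      have hmN : m < 2 ^ (matrix.headD []).length :=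
        List.mem_range.mp (List.mem_of_mem_filter hm')
      have hvm : pvValid matrix k matrix.length (matrix.headD []).length m = true :=
        List.of_mem_filter hm'
      have hget : (((List.range (2 ^ (matrix.headD []).length)).map (fun m =>
          if m < 2 ^ (matrix.headD []).length ∧
              pvValid matrix k matrix.length (matrix.headD []).length m = true
          then some (pvCols (matrix.headD []).length m) else none)).getD m none)
          = some (pvCols (matrix.headD []).length m) := by
        have hl : m < (((List.range (2 ^ (matrix.headD []).length)).map (fun m =>
            if m < 2 ^ (matrix.headD []).length ∧
                pvValid matrix k matrix.length (matrix.headD []).length m = true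
            then some (pvCols (matrix.headD []).length m) else none))).length := by
          simpa using hmN
        rw [List.getD_eq_getElem?_getD, List.getElem?_eq_getElem hl]
        simp only [List.getElem_map, List.getElem_range]
        rw [if_pos ⟨hmN, hvm⟩]
        rfl
      rw [hget]
      simp only [Option.getD_some, pvCols]
      refine congrArg PySem.Set.ofList ?_
      refine congrArg (List.map Int.ofNat) ?_
      refine List.filter_congr fun j _ => ?_
      simp [pv_and_shift]
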